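-- pv_equiv track=rewrite | github.com/Sanjeevsnair/10gbps_server_scrapper | app.py | select_lowest_size_per_quality
-- ===== SOURCE A (Python) =====
-- from collections import defaultdict
-- from typing import Dict, List, Optional
--
-- def select_lowest_size_per_quality(variants: List[Dict]) -> List[Dict]:
--     if not variants:
--         return []
--     groups = defaultdict(list)
--     for v in variants:
--         groups[v.get("quality", 0)].append(v)
--     selected = []
--     for q, vs in groups.items():
--         min_v = min(vs, key=lambda x: x.get("size", float("inf")))
--         selected.append(min_v)
--     return sorted(selected, key=lambda x: x.get("quality", 0), reverse=True)
-- ===== SOURCE B (Python) =====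
-- def select_lowest_size_per_quality(variants):
--     qualities = sorted({v.get("quality", 0) for v in variants}, reverse=True)
--     INF = float("inf")
--     result = []
--     for q in qualities:
--         best = None
--         for v in variants:
--             if v.get("quality", 0) == q and (best is None or v.get("size", INF) < best.get("size", INF)):
--                 best = v
--         result.append(best)
--     return result
-- ===== Notes on version B (the rewrite author's own statement) =====
-- stated objective: alternative
-- what changed: Replaces defaultdict grouping + per-group min() + final sort by iterating the distinct qualities in descending sorted order and, for each quality, scanning the input once with a strict-< comparison to keep the first minimal-size variant.
import Mathlib
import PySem

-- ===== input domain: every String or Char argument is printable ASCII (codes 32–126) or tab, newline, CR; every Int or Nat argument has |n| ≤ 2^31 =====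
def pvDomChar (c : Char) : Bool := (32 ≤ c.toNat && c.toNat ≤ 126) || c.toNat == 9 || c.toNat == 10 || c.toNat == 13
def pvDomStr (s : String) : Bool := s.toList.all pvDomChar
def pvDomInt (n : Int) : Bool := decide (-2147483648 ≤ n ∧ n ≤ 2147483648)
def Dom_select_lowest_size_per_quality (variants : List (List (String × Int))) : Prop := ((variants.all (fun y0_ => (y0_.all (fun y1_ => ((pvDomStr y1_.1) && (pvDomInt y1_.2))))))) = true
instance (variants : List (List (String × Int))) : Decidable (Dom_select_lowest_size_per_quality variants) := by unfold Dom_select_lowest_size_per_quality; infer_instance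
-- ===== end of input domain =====

-- B replaces grouping-dict + per-group min + final sort by a descending pass over the
-- distinct qualities with a strict-< minimum scan per quality (objective: alternative).

-- ===== PORT A =====
-- v.get("quality", 0)  (first-match lookup on the association list, as in Python)
def pvQual (v : List (String × Int)) : Int := (PySem.Dict.mk v).getD "quality" 0
-- v.get("size", float("inf")): the +inf default is modelled by the sentinel 2^32,
-- exact on Dom (every stored int has |n| ≤ 2^31 < 2^32; two missing sizes tie, as inf does)
def pvSize (v : List (String × Int)) : Int := (PySem.Dict.mk v).getD "size" 4294967296

def select_lowest_size_per_quality (variants : List (List (String × Int))) : List (List (String × Int)) :=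
  if variants = [] then []
  else
    -- groups = defaultdict(list); for v in variants: groups[v.get("quality",0)].append(v)
    -- then for q, vs in groups.items(): selected.append(min(vs, key=...)); then the final sort
    -- (groups' values are nonempty, so min() never raises; .getD [] is unreachable)
    PySem.List.sorted
      (((variants.foldl (fun d v => d.modify (pvQual v) [] (fun g => g ++ [v]))
          (PySem.Dict.empty : PySem.Dict Int (List (List (String × Int))))).items).foldl
        (fun acc p => acc ++ [(PySem.List.min? p.2 pvSize).getD []]) [])
      pvQual true

-- ===== PORT B =====
def select_lowest_size_per_quality_alt (variants : List (List (String × Int))) : List (List (String × Int)) :=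
  -- for q in sorted({v.get("quality",0) for v in variants}, reverse=True):
  --   inner scan keeping the first minimal-size variant of quality q
  -- (best is never None when appended, since q occurs in variants; .getD [] is unreachable)
  (PySem.List.sorted (PySem.Set.ofList (variants.map pvQual)) (fun q => q) true).foldl (fun res q =>
    res ++ [(variants.foldl (fun best v =>
        if pvQual v == q then
          match best with
          | none => some v
          | some m => if pvSize v < pvSize m then some v else some m
        else best) (none : Option (List (String × Int)))).getD []]) []

-- ===== PRECONDITION & SPEC =====
def Spec_select_lowest_size_per_quality (variants : List (List (String × Int))) (out : List (List (String × Int))) : Prop := out = select_lowest_size_per_quality_alt variants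
instance (variants : List (List (String × Int))) (out : List (List (String × Int))) : Decidable (Spec_select_lowest_size_per_quality variants out) := by unfold Spec_select_lowest_size_per_quality; infer_instance

-- ===== CLAIM (what is proved, stated in full; the proofs are below) =====
def Claim_equal_select_lowest_size_per_quality : Prop := ∀ (variants : List (List (String × Int))), Dom_select_lowest_size_per_quality variants → Spec_select_lowest_size_per_quality variants (select_lowest_size_per_quality variants)

-- ===== LEMMAS AND PROOFS =====

-- the variant both programs pick for quality q: first minimal-size element of the q-filter
def pvMinv (variants : List (List (String × Int))) (q : Int) : List (String × Int) :=
  (PySem.List.min? (variants.filter (fun v => pvQual v == q)) pvSize).getD []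

-- B computes the map of pvMinv over the descending-sorted distinct qualities
lemma alt_eq (variants : List (List (String × Int))) :
    select_lowest_size_per_quality_alt variants =
      (PySem.List.sorted (PySem.Set.ofList (variants.map pvQual)) (fun q => q) true).map
        (pvMinv variants) := by
  unfold select_lowest_size_per_quality_alt
  rw [PySem.List.foldl_append_singleton_eq_map, List.nil_append]
  refine List.map_congr_left (fun q _ => ?_)
  unfold pvMinv PySem.List.min?
  rw [List.foldl_filter]
  congr 2
  funext b v
  cases b <;> rfl

-- A computes the reverse-sort of the map of pvMinv over the first-occurrence distinct qualities
lemma orig_eq (variants : List (List (String × Int))) (h : variants ≠ []) :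
    select_lowest_size_per_quality variants =
      PySem.List.sorted
        ((PySem.Set.ofList (variants.map pvQual)).map (pvMinv variants)) pvQual true := by
  unfold select_lowest_size_per_quality
  rw [if_neg h]
  have hkeys : (variants.foldl (fun d v => d.modify (pvQual v) [] (fun g => g ++ [v]))
      (PySem.Dict.empty : PySem.Dict Int (List (List (String × Int))))).keys
      = PySem.Set.ofList (variants.map pvQual) := by
    rw [PySem.Dict.keys_foldl_modify_key variants pvQual [] (fun _ v g => g ++ [v])]
    simp [PySem.Dict.empty, PySem.Dict.keys, PySem.Set.update_nil_left]
  have hnodup : (variants.foldl (fun d v => d.modify (pvQual v) [] (fun g => g ++ [v]))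
      (PySem.Dict.empty : PySem.Dict Int (List (List (String × Int))))).keys.Nodup := by
    exact PySem.Dict.nodup_keys_foldl_modify_key variants pvQual [] (fun _ v g => g ++ [v]) _
      (by simp [PySem.Dict.empty, PySem.Dict.keys])
  have hget : ∀ q : Int, (variants.foldl (fun d v => d.modify (pvQual v) [] (fun g => g ++ [v]))
      (PySem.Dict.empty : PySem.Dict Int (List (List (String × Int))))).getD q []
      = variants.filter (fun v => pvQual v == q) := by
    intro q
    have hm : variants.foldl (fun d v => d.modify (pvQual v) [] (fun g => g ++ [v]))
        (PySem.Dict.empty : PySem.Dict Int (List (List (String × Int))))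
        = (variants.map (fun v => (pvQual v, v))).foldl
            (fun d p => d.modify p.1 [] (fun g => g ++ [p.2])) PySem.Dict.empty := by
      rw [List.foldl_map]
    rw [hm, PySem.Dict.getD_foldl_modify_append]
    simp [List.filter_map, Function.comp_def]
  rw [PySem.List.foldl_append_singleton_eq_map, List.nil_append,
    PySem.Dict.items_eq_map_keys _ hnodup [], hkeys, List.map_map]
  congr 1
  refine List.map_congr_left (fun q _ => ?_)
  simp only [Function.comp, hget]
  rfl

-- the selected variant for a quality that occurs has exactly that quality
lemma qual_minv (variants : List (List (String × Int))) (q : Int)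
    (hq : q ∈ PySem.Set.ofList (variants.map pvQual)) :
    pvQual (pvMinv variants q) = q := by
  rw [PySem.Set.mem_ofList, List.mem_map] at hq
  obtain ⟨v, hv, hvq⟩ := hq
  have hne : variants.filter (fun v => pvQual v == q) ≠ [] := by
    intro hnil
    have : v ∈ variants.filter (fun v => pvQual v == q) := by
      rw [List.mem_filter]; exact ⟨hv, by simp [hvq]⟩
    simp [hnil] at this
  cases hmin : PySem.List.min? (variants.filter (fun v => pvQual v == q)) pvSize with
  | none => exact absurd ((PySem.List.min?_eq_none_iff _ _).mp hmin) hne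
  | some m =>
    have hmem := PySem.List.min?_mem hmin
    rw [List.mem_filter] at hmem
    have := hmem.2
    simp only [beq_iff_eq] at this
    simp [pvMinv, hmin, this]

-- ===== VERDICT (by name: the statement is the Claim_ definition above) =====
theorem select_lowest_size_per_quality_spec : Claim_equal_select_lowest_size_per_quality := by
  intro variants _
  unfold Spec_select_lowest_size_per_quality
  by_cases h : variants = []
  · subst h; rfl
  · rw [orig_eq variants h, alt_eq variants]
    set K := PySem.Set.ofList (variants.map pvQual) with hK
    have hperm : ((PySem.List.sorted K (fun q => q) true).map (pvMinv variants)).Perm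
        (K.map (pvMinv variants)) :=
      (PySem.List.sorted_perm K (fun q => q) true).map _
    have hnd : (PySem.List.sorted K (fun q => q) true).Nodup :=
      ((PySem.List.sorted_perm K (fun q => q) true).nodup_iff).mpr
        (PySem.Set.nodup_ofList (variants.map pvQual))
    have hpw : (PySem.List.sorted K (fun q => q) true).Pairwise (fun a b => b < a) := by
      have hle := PySem.List.sorted_pairwise_rev K (fun q => q)
      have := hle.and hnd
      exact this.imp (fun hab => lt_of_le_of_ne hab.1 (Ne.symm hab.2))
    refine PySem.List.sorted_rev_eq_of_perm_of_pairwise_gt _ _ _ hperm ?_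
    rw [List.pairwise_map]
    refine hpw.imp_of_mem (fun {a b} ha hb hab => ?_)
    have ha' : a ∈ K := (PySem.List.mem_sorted _ _ _ _).mp ha
    have hb' : b ∈ K := (PySem.List.mem_sorted _ _ _ _).mp hb
    rw [qual_minv variants a ha', qual_minv variants b hb']
    exact hab
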